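-- pv_equiv track=rewrite | github.com/diptanilsaha/proctor_client | proctor_client/admin_dialogs/register.py | validate_client_name
-- ===== SOURCE A (Python) =====
-- def validate_client_name(client_name: str) -> bool:
--     l = client_name.split('.')
--     if len(l) != 3:
--         return False
--     for i in l:
--         length = len(i)
--         if length > 0 and length <= 10:
--             continue
--         else:
--             return False
--
--     return True
-- ===== SOURCE B (Python) =====
-- def validate_client_name(client_name: str) -> bool:
--     p1, d1, rest = client_name.partition('.')
--     p2, d2, p3 = rest.partition('.')
--     return bool(d1 and d2 and '.' not in p3
--                 and 1 <= len(p1) <= 10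
--                 and 1 <= len(p2) <= 10
--                 and 1 <= len(p3) <= 10)
-- ===== Notes on version B (the rewrite author's own statement) =====
-- stated objective: idiomatic
-- what changed: replaces splitting into a list of parts plus a length-checking loop by two str.partition calls on the dot separator that destructure the three parts directly and one boolean expression
import Mathlib
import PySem

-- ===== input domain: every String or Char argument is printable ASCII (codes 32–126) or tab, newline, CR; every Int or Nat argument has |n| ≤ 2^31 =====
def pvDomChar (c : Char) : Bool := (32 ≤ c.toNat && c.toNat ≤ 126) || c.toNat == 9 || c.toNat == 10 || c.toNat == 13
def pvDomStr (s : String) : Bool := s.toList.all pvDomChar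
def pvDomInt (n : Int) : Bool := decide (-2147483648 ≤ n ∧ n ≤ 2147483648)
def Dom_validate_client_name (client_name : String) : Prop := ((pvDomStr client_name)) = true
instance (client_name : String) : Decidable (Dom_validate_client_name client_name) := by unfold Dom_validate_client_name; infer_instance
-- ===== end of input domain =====

-- B replaces A's split-into-list-plus-loop by two str.partition calls on the dot separator and one boolean expression (idiomatic; same cost).

-- ===== PORT A =====
-- the for-loop over the split parts: continue while 0 < len(i) <= 10, else return False
def vcnLoop : List (List Char) → Bool
  | [] => true
  | i :: rest => if 0 < i.length && i.length ≤ 10 then vcnLoop rest else false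

def validate_client_name (client_name : String) : Bool :=
  let l := PySem.Chars.splitOn client_name.toList ['.']
  if l.length ≠ 3 then false
  else vcnLoop l

-- ===== PORT B =====
def notDot (c : Char) : Bool := !(c == '.')

-- port of str.partition('.') (single-character separator): (before, sep or '', after)
def pyPartitionDot (cs : List Char) : List Char × List Char × List Char :=
  match cs.dropWhile notDot with
  | [] => (cs, [], [])
  | _ :: rest => (cs.takeWhile notDot, ['.'], rest)

def validate_client_name_alt (client_name : String) : Bool :=
  let (p1, d1, rest) := pyPartitionDot client_name.toList
  let (p2, d2, p3) := pyPartitionDot rest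
  (!d1.isEmpty) && (!d2.isEmpty) && (!PySem.Chars.isIn ['.'] p3) &&
    (1 ≤ p1.length && p1.length ≤ 10) &&
    (1 ≤ p2.length && p2.length ≤ 10) &&
    (1 ≤ p3.length && p3.length ≤ 10)

-- ===== PRECONDITION & SPEC =====
def Spec_validate_client_name (client_name : String) (out : Bool) : Prop := out = validate_client_name_alt client_name
instance (client_name : String) (out : Bool) : Decidable (Spec_validate_client_name client_name out) := by unfold Spec_validate_client_name; infer_instance

-- ===== CLAIM (what is proved, stated in full; the proofs are below) =====
def Claim_equal_validate_client_name : Prop := ∀ (client_name : String), Dom_validate_client_name client_name → Spec_validate_client_name client_name (validate_client_name client_name)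

-- ===== LEMMAS AND PROOFS =====

-- structural model of split('.') on char lists: current part accumulator (reversed) + remaining chars
def partsFrom (cur : List Char) : List Char → List (List Char)
  | [] => [cur.reverse]
  | c :: rest => if c = '.' then cur.reverse :: partsFrom [] rest else partsFrom (c :: cur) rest

lemma go_eq_partsFrom : ∀ (fuel : Nat) (l cur : List Char) (acc : List (List Char)),
    l.length < fuel →
    PySem.Chars.splitOn.go ['.'] fuel l cur acc = acc.reverse ++ partsFrom cur l := by
  intro fuel
  induction fuel with
  | zero => intro l cur acc h; omega
  | succ f ih =>
    intro l cur acc h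
    cases l with
    | nil => simp [PySem.Chars.splitOn.go, partsFrom]
    | cons c rest =>
      simp only [PySem.Chars.splitOn.go, List.isPrefixOf]
      simp only [List.length_cons] at h
      by_cases hc : c = '.'
      · subst hc
        simp only [beq_self_eq_true, Bool.and_true, if_pos]
        rw [ih _ _ _ (by simp; omega)]
        simp [partsFrom]
      · simp only [show ('.' == c && true) = false by simp [Ne.symm hc],
          Bool.false_eq_true, if_false]
        rw [ih _ _ _ (by omega)]
        simp [partsFrom, hc]

lemma splitOn_dot (cs : List Char) : PySem.Chars.splitOn cs ['.'] = partsFrom [] cs := by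
  have := go_eq_partsFrom (cs.length + 1) cs [] [] (by omega)
  simpa [PySem.Chars.splitOn] using this

lemma partsFrom_key (cs : List Char) : ∀ cur, partsFrom cur cs =
    (cur.reverse ++ cs.takeWhile notDot) ::
      (match cs.dropWhile notDot with
       | [] => ([] : List (List Char))
       | _ :: r => partsFrom [] r) := by
  induction cs with
  | nil => intro cur; simp [partsFrom]
  | cons c rest ih =>
    intro cur
    by_cases hc : c = '.'
    · subst hc; simp [partsFrom, notDot]
    · simp only [partsFrom, if_neg hc, ih (c :: cur)]
      simp [notDot, hc]

lemma partsFrom_ne_nil (cs cur : List Char) : partsFrom cur cs ≠ [] := by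
  rw [partsFrom_key]; simp

lemma partsFrom_key_nil (cs cur : List Char) (h : cs.dropWhile notDot = []) :
    partsFrom cur cs = [cur.reverse ++ cs.takeWhile notDot] := by
  rw [partsFrom_key, h]

lemma partsFrom_key_cons (cs cur : List Char) (c : Char) (r : List Char)
    (h : cs.dropWhile notDot = c :: r) :
    partsFrom cur cs = (cur.reverse ++ cs.takeWhile notDot) :: partsFrom [] r := by
  rw [partsFrom_key, h]

lemma isIn_dot_eq (p : List Char) : PySem.Chars.isIn ['.'] p = p.contains '.' := by
  by_cases h : '.' ∈ p
  · rw [(PySem.Chars.isIn_iff_infix _ _).mpr ((List.singleton_infix_iff _ _).mpr h)]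
    simp [h]
  · rw [(PySem.Chars.isIn_eq_false_iff _ _).mpr
      (fun hi => h ((List.singleton_infix_iff _ _).mp hi))]
    simp [h]

lemma pyPartitionDot_eq_nil (cs : List Char) (h : cs.dropWhile notDot = []) :
    pyPartitionDot cs = (cs, [], []) := by
  simp [pyPartitionDot, h]

lemma pyPartitionDot_eq_cons (cs : List Char) (c : Char) (rest : List Char)
    (h : cs.dropWhile notDot = c :: rest) :
    pyPartitionDot cs = (cs.takeWhile notDot, ['.'], rest) := by
  simp [pyPartitionDot, h]

lemma main_eq (cs : List Char) :
    (let l := PySem.Chars.splitOn cs ['.'];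
     if l.length ≠ 3 then false else vcnLoop l) =
    (let (p1, d1, rest) := pyPartitionDot cs
     let (p2, d2, p3) := pyPartitionDot rest
     (!d1.isEmpty) && (!d2.isEmpty) && (!PySem.Chars.isIn ['.'] p3) &&
       (1 ≤ p1.length && p1.length ≤ 10) &&
       (1 ≤ p2.length && p2.length ≤ 10) &&
       (1 ≤ p3.length && p3.length ≤ 10)) := by
  simp only [splitOn_dot]
  cases h1 : cs.dropWhile notDot with
  | nil =>
    rw [partsFrom_key_nil cs [] h1, pyPartitionDot_eq_nil cs h1]
    simp [pyPartitionDot]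
  | cons c1 rest =>
    rw [partsFrom_key_cons cs [] c1 rest h1, pyPartitionDot_eq_cons cs c1 rest h1]
    cases h2 : rest.dropWhile notDot with
    | nil =>
      rw [partsFrom_key_nil rest [] h2, pyPartitionDot_eq_nil rest h2]
      simp
    | cons c2 p3 =>
      rw [partsFrom_key_cons rest [] c2 p3 h2, pyPartitionDot_eq_cons rest c2 p3 h2]
      by_cases hdot : '.' ∈ p3
      · have hin : PySem.Chars.isIn ['.'] p3 = true := by
          rw [isIn_dot_eq]; simp [hdot]
        have hne : p3.dropWhile notDot ≠ [] := by
          intro h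
          have := List.dropWhile_eq_nil_iff.mp h '.' hdot
          simp [notDot] at this
        cases h3 : p3.dropWhile notDot with
        | nil => exact absurd h3 hne
        | cons c3 t3 =>
          rw [partsFrom_key_cons p3 [] c3 t3 h3]
          have hcond : ((cs.takeWhile notDot) :: (rest.takeWhile notDot) ::
              (p3.takeWhile notDot) :: partsFrom [] t3).length ≠ 3 := by
            cases hp : partsFrom ([] : List Char) t3 with
            | nil => exact absurd hp (partsFrom_ne_nil t3 [])
            | cons a t => simp
          simp only [List.reverse_nil, List.nil_append]
          rw [if_pos hcond, hin]
          simp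
      · have hall : ∀ x ∈ p3, x ≠ '.' := fun x hx => fun he => hdot (he ▸ hx)
        have ht : p3.takeWhile notDot = p3 := List.takeWhile_eq_self_iff.mpr (by
          intro a ha; simpa [notDot] using hall a ha)
        have hd : p3.dropWhile notDot = [] := List.dropWhile_eq_nil_iff.mpr (by
          intro a ha; simpa [notDot] using hall a ha)
        have hin : PySem.Chars.isIn ['.'] p3 = false := by
          rw [isIn_dot_eq]; simp [hdot]
        rw [partsFrom_key_nil p3 [] hd, ht, hin]
        simp only [List.reverse_nil, List.nil_append, List.length_cons, List.length_nil]
        rw [if_neg (by simp)]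
        simp [vcnLoop, Bool.and_assoc, Nat.pos_iff_ne_zero, Nat.one_le_iff_ne_zero]

-- ===== VERDICT (by name: the statement is the Claim_ definition above) =====
theorem validate_client_name_spec : Claim_equal_validate_client_name := by
  intro s _
  unfold Spec_validate_client_name validate_client_name validate_client_name_alt
  exact main_eq s.toList
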